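-- pv_equiv track=rewrite | github.com/Oustad/kortly-pokemon-api | src/scanner/routes/scan.py | _is_xy_family_match
-- ===== SOURCE A (Python) =====
-- def _is_xy_family_match(gemini_set: str, card_set: str) -> bool:
--     """
--     Check if two sets are within the same XY family.
--
--     Args:
--         gemini_set: Set name from AI (lowercased)
--         card_set: Set name from TCG API (lowercased)
--
--     Returns:
--         True if both sets are in the XY family
--     """
--     xy_sets = [
--         "xy", "xy base",
--         "xy flashfire", "xy furious fists", "xy phantom forces",
--         "xy primal clash", "xy roaring skies", "xy ancient origins",
--         "xy breakthrough", "xy breakpoint", "xy fates collide",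
--         "xy steam siege", "xy evolutions"
--     ]
--
--     # Normalize set names for comparison
--     gemini_normalized = gemini_set.replace(" ", "").replace("-", "").lower()
--     card_normalized = card_set.replace(" ", "").replace("-", "").lower()
--
--     gemini_is_xy = any(xy_set.replace(" ", "").replace("-", "") in gemini_normalized for xy_set in xy_sets)
--     card_is_xy = any(xy_set.replace(" ", "").replace("-", "") in card_normalized for xy_set in xy_sets)
--
--     return gemini_is_xy and card_is_xy
-- ===== SOURCE B (Python) =====
-- def _is_xy_family_match(gemini_set: str, card_set: str) -> bool:
--     # Every XY set name normalizes to a string starting with "xy", and "xy"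
--     # itself is among them, so membership of "xy" in the normalized input is
--     # exactly the original any() over the 13 entries.
--     def _has_xy(s):
--         return "xy" in s.replace(" ", "").replace("-", "").lower()
--     return _has_xy(gemini_set) and _has_xy(card_set)
-- ===== Notes on version B (the rewrite author's own statement) =====
-- stated objective: simpler
-- what changed: Replaced the any() scan of 13 substring tests over the xy_sets list by a single substring test 'xy' in the normalized name (valid because every entry normalizes to a string containing 'xy' and 'xy' itself is an entry).
import Mathlib
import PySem

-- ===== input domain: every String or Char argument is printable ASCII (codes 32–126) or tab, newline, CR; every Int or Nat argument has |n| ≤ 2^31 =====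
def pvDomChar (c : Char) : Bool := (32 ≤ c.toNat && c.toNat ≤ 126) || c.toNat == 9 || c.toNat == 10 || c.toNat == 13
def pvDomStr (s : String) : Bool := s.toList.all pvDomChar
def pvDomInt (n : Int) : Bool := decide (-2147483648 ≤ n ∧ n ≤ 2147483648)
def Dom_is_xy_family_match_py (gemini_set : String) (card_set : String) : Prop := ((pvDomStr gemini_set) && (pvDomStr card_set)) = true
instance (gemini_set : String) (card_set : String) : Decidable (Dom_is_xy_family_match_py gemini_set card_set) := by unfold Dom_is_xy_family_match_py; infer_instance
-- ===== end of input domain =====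

-- B replaces the any() scan over the 13-entry xy_sets list by the single test "xy" in the
-- normalized name (every entry normalizes to a string containing "xy", and "xy" is an entry): simpler.
-- ===== PORT A =====
def pvXYSets : List String :=
  ["xy", "xy base",
   "xy flashfire", "xy furious fists", "xy phantom forces",
   "xy primal clash", "xy roaring skies", "xy ancient origins",
   "xy breakthrough", "xy breakpoint", "xy fates collide",
   "xy steam siege", "xy evolutions"]

def is_xy_family_match_py (gemini_set : String) (card_set : String) : Bool :=
  let gemini_normalized := PySem.Str.lower (PySem.Str.replace (PySem.Str.replace gemini_set " " "") "-" "")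
  let card_normalized := PySem.Str.lower (PySem.Str.replace (PySem.Str.replace card_set " " "") "-" "")
  let gemini_is_xy := pvXYSets.any (fun xy_set => PySem.Str.isIn (PySem.Str.replace (PySem.Str.replace xy_set " " "") "-" "") gemini_normalized)
  let card_is_xy := pvXYSets.any (fun xy_set => PySem.Str.isIn (PySem.Str.replace (PySem.Str.replace xy_set " " "") "-" "") card_normalized)
  gemini_is_xy && card_is_xy

-- ===== PORT B =====
def pvHasXY (s : String) : Bool :=
  PySem.Str.isIn "xy" (PySem.Str.lower (PySem.Str.replace (PySem.Str.replace s " " "") "-" ""))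

def is_xy_family_match_py_alt (gemini_set : String) (card_set : String) : Bool :=
  pvHasXY gemini_set && pvHasXY card_set

-- ===== PRECONDITION & SPEC =====
def Spec_is_xy_family_match_py (gemini_set : String) (card_set : String) (out : Bool) : Prop := out = is_xy_family_match_py_alt gemini_set card_set
instance (gemini_set : String) (card_set : String) (out : Bool) : Decidable (Spec_is_xy_family_match_py gemini_set card_set out) := by unfold Spec_is_xy_family_match_py; infer_instance

-- ===== CLAIM (what is proved, stated in full; the proofs are below) =====
def Claim_equal_is_xy_family_match_py : Prop := ∀ (gemini_set : String) (card_set : String), Dom_is_xy_family_match_py gemini_set card_set → Spec_is_xy_family_match_py gemini_set card_set (is_xy_family_match_py gemini_set card_set)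

-- ===== LEMMAS AND PROOFS =====

-- ===== VERDICT (by name: the statement is the Claim_ definition above) =====
-- transitivity of substring containment through PySem.Str.isIn
theorem pvIsIn_trans (e s : List Char) (h : ['x','y'] <:+: e)
    (he : PySem.Chars.isIn e s = true) : PySem.Chars.isIn ['x','y'] s = true := by
  rw [PySem.Chars.isIn_iff_infix] at he ⊢
  exact h.trans he

-- the any() over the xy_sets list equals the single "xy" test
theorem pvAny_eq (s : String) :
    (pvXYSets.any (fun xy_set => PySem.Str.isIn (PySem.Str.replace (PySem.Str.replace xy_set " " "") "-" "") s)) = PySem.Str.isIn "xy" s := by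
  cases h : PySem.Str.isIn "xy" s with
  | true =>
    simp only [List.any_eq_true]
    exact ⟨"xy", by decide, by simpa using h⟩
  | false =>
    simp only [List.any_eq_false]
    intro e he
    fin_cases he <;>
      · intro hc
        have h2 : PySem.Chars.isIn ['x','y'] s.toList = false := by
          simpa [PySem.Str.isIn] using h
        simp only [PySem.Str.isIn] at hc
        rw [pvIsIn_trans _ _ (by decide) hc] at h2
        cases h2

theorem is_xy_family_match_py_spec : Claim_equal_is_xy_family_match_py := by
  intro g c _
  unfold Spec_is_xy_family_match_py is_xy_family_match_py is_xy_family_match_py_alt pvHasXY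
  simp only [pvAny_eq]
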